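-- pv_equiv track=rewrite | github.com/t83955832/260201076 | lab8/ex5.py | get_password_level
-- ===== SOURCE A (Python) =====
-- def get_password_level(pw):
--     level = 0
--     letters = 0
--     numbers = 0
--     specials = 0
--
--
--
--
--     if len(pw) < 8 or " " in pw:
--         return(level)
--
--
--
--     for char in pw:
--         if char.isalpha():
--             letters += 1
--         elif char.isnumeric():
--             numbers += 1
--         else:
--             specials += 1
--
--
--
--     if letters > 0:
--         level += 1
--     if numbers > 0:
--         level += 1
--     if specials > 0:
--         level += 1
--
--     return(level)
-- ===== SOURCE B (Python) =====
-- def get_password_level(pw):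
--     if len(pw) < 8 or " " in pw:
--         return 0
--     return (any(c.isalpha() for c in pw)
--             + any(c.isnumeric() for c in pw)
--             + any(not c.isalpha() and not c.isnumeric() for c in pw))
-- ===== Notes on version B (the rewrite author's own statement) =====
-- stated objective: simpler
-- what changed: Replaces the three-counter loop plus threshold checks by summing three any() category tests (booleans as ints) after the same guard.
import Mathlib
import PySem

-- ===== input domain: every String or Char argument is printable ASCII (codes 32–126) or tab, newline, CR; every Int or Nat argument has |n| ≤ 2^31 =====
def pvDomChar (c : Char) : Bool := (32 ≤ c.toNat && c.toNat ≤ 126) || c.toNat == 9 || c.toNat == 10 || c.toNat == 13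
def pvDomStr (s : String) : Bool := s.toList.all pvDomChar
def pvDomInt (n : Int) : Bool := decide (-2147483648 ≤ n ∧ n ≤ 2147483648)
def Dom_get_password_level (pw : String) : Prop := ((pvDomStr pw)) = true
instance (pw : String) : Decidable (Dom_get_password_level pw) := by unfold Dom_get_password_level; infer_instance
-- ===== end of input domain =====

-- B replaces A's three running counters and threshold tests by summing three any() category
-- tests after the same guard; same cost, simpler. Python's isnumeric is ported as
-- PySem.Chars.isdigit, exact on the ASCII domain Dom_get_password_level.

-- ===== PORT A =====
-- A's for-loop over pw, maintaining (letters, numbers, specials)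
def pvCountLoop : List Char → Int → Int → Int → Int × Int × Int
  | [], letters, numbers, specials => (letters, numbers, specials)
  | c :: rest, letters, numbers, specials =>
    if PySem.Chars.isalpha c then pvCountLoop rest (letters + 1) numbers specials
    else if PySem.Chars.isdigit c then pvCountLoop rest letters (numbers + 1) specials
    else pvCountLoop rest letters numbers (specials + 1)

def get_password_level (pw : String) : Int :=
  let level : Int := 0
  if PySem.Str.len pw < 8 || PySem.Str.isIn " " pw then level
  else
    let (letters, numbers, specials) := pvCountLoop pw.toList 0 0 0
    let level := if letters > 0 then level + 1 else level
    let level := if numbers > 0 then level + 1 else level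
    let level := if specials > 0 then level + 1 else level
    level

-- ===== PORT B =====
def get_password_level_alt (pw : String) : Int :=
  if PySem.Str.len pw < 8 || PySem.Str.isIn " " pw then 0
  else
    (if pw.toList.any PySem.Chars.isalpha then (1 : Int) else 0)
      + (if pw.toList.any PySem.Chars.isdigit then (1 : Int) else 0)
      + (if pw.toList.any (fun c => !PySem.Chars.isalpha c && !PySem.Chars.isdigit c)
          then (1 : Int) else 0)

-- ===== PRECONDITION & SPEC =====
def Spec_get_password_level (pw : String) (out : Int) : Prop := out = get_password_level_alt pw
instance (pw : String) (out : Int) : Decidable (Spec_get_password_level pw out) := by unfold Spec_get_password_level; infer_instance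

-- ===== CLAIM (what is proved, stated in full; the proofs are below) =====
def Claim_equal_get_password_level : Prop := ∀ (pw : String), Dom_get_password_level pw → Spec_get_password_level pw (get_password_level pw)

-- ===== LEMMAS AND PROOFS =====

lemma pvCountLoop_eq (l : List Char) (a n s : Int) :
    pvCountLoop l a n s =
      (a + l.countP PySem.Chars.isalpha,
       n + l.countP (fun c => !PySem.Chars.isalpha c && PySem.Chars.isdigit c),
       s + l.countP (fun c => !PySem.Chars.isalpha c && !PySem.Chars.isdigit c)) := by
  induction l generalizing a n s with
  | nil => simp [pvCountLoop]
  | cons c rest ih =>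
    by_cases ha : PySem.Chars.isalpha c
    · simp [pvCountLoop, ha, ih, Prod.ext_iff]
      omega
    · by_cases hd : PySem.Chars.isdigit c
      · simp [pvCountLoop, ha, hd, ih, Prod.ext_iff]
        omega
      · simp [pvCountLoop, ha, hd, ih, Prod.ext_iff]
        omega

lemma pv_digit_not_alpha (c : Char) (h : PySem.Chars.isdigit c = true) :
    PySem.Chars.isalpha c = false := by
  simp [PySem.Chars.isdigit, PySem.Chars.isalpha, PySem.Chars.isupper, PySem.Chars.islower,
    Char.le_def, UInt32.le_iff_toNat_le] at *
  omega

lemma pv_countP_pos_iff_any (l : List Char) (p : Char → Bool) :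
    ((0:Int) < (l.countP p : Int)) ↔ l.any p = true := by
  rw [List.any_eq_true]
  rw [show ((0:Int) < (l.countP p : Int)) ↔ 0 < l.countP p by exact_mod_cast Iff.rfl]
  exact List.countP_pos_iff

-- ===== VERDICT (by name: the statement is the Claim_ definition above) =====
theorem get_password_level_spec : Claim_equal_get_password_level := by
  intro pw _
  unfold Spec_get_password_level get_password_level get_password_level_alt
  cases hg : (PySem.Str.len pw < 8 || PySem.Str.isIn " " pw) with
  | true => simp
  | false =>
    have hdig : pw.toList.any (fun c => !PySem.Chars.isalpha c && PySem.Chars.isdigit c)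
        = pw.toList.any PySem.Chars.isdigit := by
      apply PySem.List.any_congr_mem
      intro x _
      by_cases hd : PySem.Chars.isdigit x
      · simp [hd, pv_digit_not_alpha x hd]
      · simp [hd]
    simp only [pvCountLoop_eq, zero_add, Bool.false_eq_true, if_false]
    simp only [pv_countP_pos_iff_any, hdig]
    by_cases h1 : pw.toList.any PySem.Chars.isalpha <;>
      by_cases h2 : pw.toList.any PySem.Chars.isdigit <;>
        by_cases h3 : pw.toList.any (fun c => !PySem.Chars.isalpha c && !PySem.Chars.isdigit c) <;>
          simp [h1, h2, h3]
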